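-- pv_equiv track=rewrite | github.com/LJFHendriks/AdventOfCode2020 | 2020_day07/2020_day7.py | lookupbag
-- ===== SOURCE A (Python) =====
-- def lookupbag(rulesdic, bagcolor):
--     if bagcolor in rulesdic:
--         bags = rulesdic[bagcolor]
--         bagcolors = [bagcolor]
--         for i in range(len(bags)):
--             newbagcolors = lookupbag(rulesdic,bags[i])
--             for i in range(len(newbagcolors)):
--                 if newbagcolors[i] not in bagcolors:
--                     bagcolors.append(newbagcolors[i])
--         return bagcolors
--     return [bagcolor]
-- ===== SOURCE B (Python) =====
-- def lookupbag(rulesdic, bagcolor):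
--     # Depth-first traversal with a visited set: each color is expanded at most once,
--     # so shared sub-bags are never re-traversed.
--     seen = set()
--     order = []
--     def visit(color):
--         if color in seen:
--             return
--         seen.add(color)
--         order.append(color)
--         for child in rulesdic.get(color, []):
--             visit(child)
--     visit(bagcolor)
--     return order
-- ===== Notes on version B (the rewrite author's own statement) =====
-- stated objective: alternative
-- what changed: A recomputes the full contained-colors list of every sub-bag recursively and merges the sublists with a not-in-list dedup scan, revisiting shared sub-bags; B performs one depth-first traversal with a visited set and an output list, expanding each color at most once (intended as faster; a timing run measured 1.68x at the largest size but inconsistently, so no speed is claimed).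
import Mathlib
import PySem

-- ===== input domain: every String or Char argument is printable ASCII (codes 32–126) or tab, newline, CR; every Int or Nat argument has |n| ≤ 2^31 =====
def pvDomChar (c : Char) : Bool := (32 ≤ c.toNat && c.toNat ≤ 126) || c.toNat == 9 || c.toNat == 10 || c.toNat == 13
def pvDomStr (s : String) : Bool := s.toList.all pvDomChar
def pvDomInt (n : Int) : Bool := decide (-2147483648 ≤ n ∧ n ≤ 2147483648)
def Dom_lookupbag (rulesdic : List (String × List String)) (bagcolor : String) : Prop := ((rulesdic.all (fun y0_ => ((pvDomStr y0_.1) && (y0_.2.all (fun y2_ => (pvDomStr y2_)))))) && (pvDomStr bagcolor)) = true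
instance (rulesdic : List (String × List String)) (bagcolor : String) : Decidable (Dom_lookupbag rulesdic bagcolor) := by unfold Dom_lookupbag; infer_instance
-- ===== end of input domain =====

-- B replaces A's recursive recompute-and-dedup of full sub-bag lists by a single
-- depth-first traversal with a visited set: each color is expanded at most once.

-- ===== PORT A =====
-- append x to the list if absent ('if newbagcolors[i] not in bagcolors: bagcolors.append(...)')
def pvPush (acc : List String) (x : String) : List String :=
  if x ∈ acc then acc else acc ++ [x]

-- literal transliteration of A; fuel (rulesdic.length + 1) bounds the recursion depth,
-- which under Pre_ (acyclic rules) never runs out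
def lookupbagFuel (rulesdic : List (String × List String)) : Nat → String → List String
  | 0, _ => []
  | f+1, bagcolor =>
    match PySem.Dict.get? (PySem.Dict.mk rulesdic) bagcolor with
    | some bags =>
        bags.foldl (fun bagcolors nb => (lookupbagFuel rulesdic f nb).foldl pvPush bagcolors)
          [bagcolor]
    | none => [bagcolor]

def lookupbag (rulesdic : List (String × List String)) (bagcolor : String) : List String :=
  lookupbagFuel rulesdic (rulesdic.length + 1) bagcolor

-- ===== PORT B =====
-- literal transliteration of B's 'visit': state = (seen set, order list); same fuel bound
def pvVisit (rulesdic : List (String × List String)) :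
    Nat → (PySem.Set String × List String) → String → (PySem.Set String × List String)
  | 0, so, _ => so
  | f+1, so, color =>
    if PySem.Set.contains so.1 color then so
    else
      (PySem.Dict.getD (PySem.Dict.mk rulesdic) color []).foldl
        (fun so b => pvVisit rulesdic f so b)
        (PySem.Set.add so.1 color, so.2 ++ [color])

def lookupbag_alt (rulesdic : List (String × List String)) (bagcolor : String) : List String :=
  (pvVisit rulesdic (rulesdic.length + 1) (PySem.Set.empty, []) bagcolor).2

-- ===== PRECONDITION & SPEC =====
def pvKeys (rulesdic : List (String × List String)) : List String := rulesdic.map Prod.fst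

def pvChildren (rulesdic : List (String × List String)) (x : String) : List String :=
  PySem.Dict.getD (PySem.Dict.mk rulesdic) x []

-- Kahn-style elimination: pvOk r (k+1) = keys all of whose children are non-keys or already eliminated
def pvOk (rulesdic : List (String × List String)) : Nat → List String
  | 0 => []
  | k+1 => (pvKeys rulesdic).filter (fun key =>
      (pvChildren rulesdic key).all
        (fun v => !(pvKeys rulesdic).contains v || (pvOk rulesdic k).contains v))

-- Pre_ holds iff bagcolor is Kahn-eliminable, i.e. iff no cycle of the rules is reachable
-- from bagcolor: it excludes exactly the inputs on which A recurses forever (RecursionError).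
def Pre_lookupbag (rulesdic : List (String × List String)) (bagcolor : String) : Prop :=
  bagcolor ∉ pvKeys rulesdic ∨ bagcolor ∈ pvOk rulesdic rulesdic.length

instance (rulesdic : List (String × List String)) (bagcolor : String) :
    Decidable (Pre_lookupbag rulesdic bagcolor) := by unfold Pre_lookupbag; infer_instance

def pvWitness_lookupbag : (List (String × List String)) × String :=
  ([("a", ["b", "c"]), ("b", ["c"])], "a")

def Spec_lookupbag (rulesdic : List (String × List String)) (bagcolor : String) (out : List String) : Prop := out = lookupbag_alt rulesdic bagcolor
instance (rulesdic : List (String × List String)) (bagcolor : String) (out : List String) : Decidable (Spec_lookupbag rulesdic bagcolor out) := by unfold Spec_lookupbag; infer_instance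

-- ===== CLAIM (what is proved, stated in full; the proofs are below) =====
def Claim_equal_lookupbag : Prop := ∀ (rulesdic : List (String × List String)) (bagcolor : String), Dom_lookupbag rulesdic bagcolor → Pre_lookupbag rulesdic bagcolor → Spec_lookupbag rulesdic bagcolor (lookupbag rulesdic bagcolor)

-- ===== LEMMAS AND PROOFS =====

-- proof-side notions: the edge relation of the rules graph and its reflexive-transitive closure
def pvEdge (r : List (String × List String)) (x y : String) : Prop := y ∈ pvChildren r x
def pvReach (r : List (String × List String)) : String → String → Prop :=
  Relation.ReflTransGen (pvEdge r)
-- depth certificate: pvFits r f b = true means every rules-path from b has length < f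
def pvFits (r : List (String × List String)) : Nat → String → Bool
  | 0, _ => false
  | f+1, x => (pvChildren r x).all (pvFits r f)

theorem pvChildren_of_not_key {r : List (String × List String)} {x : String}
    (h : x ∉ pvKeys r) : pvChildren r x = [] := by
  unfold pvChildren
  have hn : (PySem.Dict.mk r).get? x = none := by
    rw [PySem.Dict.get?_eq_none_iff_not_mem_keys]
    simpa only [PySem.Dict.keys_mk] using h
  rw [PySem.Dict.getD_eq_get?_getD, hn]
  rfl

theorem pvOk_mono1 {r : List (String × List String)} :
    ∀ k, ∀ x ∈ pvOk r k, x ∈ pvOk r (k+1) := by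
  intro k
  induction k with
  | zero => intro x hx; simp [pvOk] at hx
  | succ m ih =>
    intro x hx
    simp only [pvOk, List.mem_filter, List.all_eq_true] at hx ⊢
    refine ⟨hx.1, fun v hv => ?_⟩
    have := hx.2 v hv
    cases hkv : (pvKeys r).contains v with
    | false => simp
    | true =>
      simp only [hkv, Bool.not_true, Bool.false_or, List.contains_iff_mem] at this ⊢
      exact ih v this

theorem pvOk_mono {r : List (String × List String)} {j k : Nat} (h : j ≤ k) :
    ∀ x ∈ pvOk r j, x ∈ pvOk r k := by
  induction h with
  | refl => exact fun x hx => hx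
  | step _ ih => exact fun x hx => pvOk_mono1 _ x (ih x hx)

theorem pvOk_step {r : List (String × List String)} {x : String} {k : Nat}
    (h : x ∈ pvOk r (k+1)) : ∀ v ∈ pvChildren r x, v ∉ pvKeys r ∨ v ∈ pvOk r k := by
  intro v hv
  simp only [pvOk, List.mem_filter, List.all_eq_true] at h
  have := h.2 v hv
  cases hkv : (pvKeys r).contains v with
  | false =>
    left
    intro hm
    simp [List.contains_iff_mem, hm] at hkv
  | true =>
    right
    simp only [hkv, Bool.not_true, Bool.false_or, List.contains_iff_mem] at this
    exact this

theorem pvOk_key {r : List (String × List String)} {x : String} {k : Nat}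
    (h : x ∈ pvOk r k) : x ∈ pvKeys r := by
  match k with
  | 0 => simp [pvOk] at h
  | k+1 =>
    simp only [pvOk, List.mem_filter] at h
    exact h.1

theorem pvEdge_key {r : List (String × List String)} {x y : String}
    (h : pvEdge r x y) : x ∈ pvKeys r := by
  by_contra hx
  rw [pvEdge, pvChildren_of_not_key hx] at h
  simp at h

theorem pvPath {r : List (String × List String)} {a y : String}
    (h : pvReach r a y) (hy : y ∈ pvKeys r) :
    ∀ m, a ∈ pvOk r m → y ∈ pvOk r m := by
  induction h using Relation.ReflTransGen.head_induction_on with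
  | refl => exact fun m hm => hm
  | head hab _ ih =>
    rename_i a' b' _
    intro m hm
    obtain ⟨m', rfl⟩ : ∃ m', m = m' + 1 := by
      cases m with
      | zero => simp [pvOk] at hm
      | succ m' => exact ⟨m', rfl⟩
    rcases pvOk_step hm b' hab with hnk | hok
    · -- b' is not a key: then b' = y is impossible unless b' = y … y is a key
      rename_i hreach
      rcases (Relation.ReflTransGen.cases_head hreach) with rfl | ⟨c, hc, _⟩
      · exact absurd hy hnk
      · exact absurd (pvEdge_key hc) hnk
    · exact pvOk_mono (Nat.le_succ m') y (ih (m') hok)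

theorem pvNC {r : List (String × List String)} :
    ∀ n, ∀ y ∈ pvOk r n, ∀ z, pvEdge r y z → ¬ pvReach r z y := by
  intro n
  induction n using Nat.strong_induction_on with
  | _ n ih =>
    intro y hy z hz hreach
    match n, hy with
    | n+1, hy =>
      rcases pvOk_step hy z hz with hnk | hok
      · rcases (Relation.ReflTransGen.cases_head hreach) with rfl | ⟨c, hc, _⟩
        · exact hnk (pvEdge_key hz)
        · exact hnk (pvEdge_key hc)
      · have hyok : y ∈ pvOk r n := pvPath hreach (pvOk_key hy) n hok
        exact ih n (Nat.lt_succ_self n) y hyok z hz hreach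

theorem pvFits_of_ok {r : List (String × List String)} :
    ∀ n x, (x ∉ pvKeys r ∨ x ∈ pvOk r n) → pvFits r (n+1) x = true := by
  intro n
  induction n with
  | zero =>
    intro x hx
    rcases hx with hx | hx
    · simp [pvFits, pvChildren_of_not_key hx]
    · simp [pvOk] at hx
  | succ m ih =>
    intro x hx
    rcases hx with hx | hx
    · simp [pvFits, pvChildren_of_not_key hx]
    · rw [show pvFits r (m+1+1) x = (pvChildren r x).all (pvFits r (m+1)) from rfl,
        List.all_eq_true]
      intro v hv
      exact ih v (pvOk_step hx v hv)

theorem mem_pushAll {a l : List String} {y : String} :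
    y ∈ List.foldl pvPush a l ↔ y ∈ a ∨ y ∈ l := by
  induction l generalizing a with
  | nil => simp
  | cons x l ih =>
    simp only [List.foldl_cons, ih, pvPush]
    split_ifs with hx
    · constructor
      · rintro (h | h)
        · exact Or.inl h
        · exact Or.inr (List.mem_cons_of_mem _ h)
      · rintro (h | h)
        · exact Or.inl h
        · rcases List.mem_cons.mp h with rfl | h
          · exact Or.inl hx
          · exact Or.inr h
    · simp only [List.mem_append, List.mem_singleton, List.mem_cons]
      tauto

theorem pushAll_eq_of_subset {a l : List String} (h : ∀ x ∈ l, x ∈ a) :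
    List.foldl pvPush a l = a := by
  induction l generalizing a with
  | nil => rfl
  | cons x l ih =>
    have hx : x ∈ a := h x (List.mem_cons_self ..)
    simp only [List.foldl_cons, pvPush, if_pos hx]
    exact ih fun z hz => h z (List.mem_cons_of_mem _ hz)

theorem pushAll_push (acc a : List String) (x : String) :
    List.foldl pvPush acc (pvPush a x) = pvPush (List.foldl pvPush acc a) x := by
  by_cases hx : x ∈ a
  · have h1 : pvPush a x = a := by simp [pvPush, hx]
    have h2 : pvPush (List.foldl pvPush acc a) x = List.foldl pvPush acc a := by
      simp [pvPush, mem_pushAll.mpr (Or.inr hx)]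
    rw [h1, h2]
  · have h1 : pvPush a x = a ++ [x] := by simp [pvPush, hx]
    rw [h1, List.foldl_append]
    rfl

theorem pushAll_pushAll (L : List String) (acc a : List String) :
    List.foldl pvPush acc (List.foldl pvPush a L) = List.foldl pvPush (List.foldl pvPush acc a) L := by
  induction L generalizing a with
  | nil => rfl
  | cons x L ih =>
    simp only [List.foldl_cons]
    rw [ih (pvPush a x), pushAll_push]

theorem pushAll_foldl (h : String → List String) (bs : List String) (acc a : List String) :
    List.foldl pvPush acc (bs.foldl (fun x bi => List.foldl pvPush x (h bi)) a)
      = bs.foldl (fun x bi => List.foldl pvPush x (h bi)) (List.foldl pvPush acc a) := by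
  induction bs generalizing acc a with
  | nil => rfl
  | cons b bs ih =>
    simp only [List.foldl_cons]
    rw [ih, pushAll_pushAll]

theorem pushAll_nodup {a : List String} (l : List String) (h : a.Nodup) :
    (List.foldl pvPush a l).Nodup := by
  induction l generalizing a with
  | nil => exact h
  | cons x l ih =>
    refine ih ?_
    unfold pvPush
    split_ifs with hx
    · exact h
    · rw [List.nodup_append]
      refine ⟨h, List.nodup_singleton x, ?_⟩
      intro p hp q hq
      have hq' : q = x := by simpa using hq
      subst hq'
      exact fun e => hx (e ▸ hp)

theorem pushAll_of_nodup {a l : List String} (h : (a ++ l).Nodup) :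
    List.foldl pvPush a l = a ++ l := by
  induction l generalizing a with
  | nil => simp
  | cons x l ih =>
    have hx : x ∉ a := by
      intro hx
      have := List.disjoint_of_nodup_append h
      exact this hx (List.mem_cons_self ..)
    simp only [List.foldl_cons, pvPush, if_neg hx]
    rw [ih (a := a ++ [x]) (by simpa using h)]
    simp

theorem lookupbagFuel_nodup (r : List (String × List String)) :
    ∀ f b, (lookupbagFuel r f b).Nodup := by
  intro f
  induction f with
  | zero => intro b; simp [lookupbagFuel]
  | succ f _ =>
    intro b
    have gen : ∀ (l : List String) (acc : List String), acc.Nodup →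
        (l.foldl (fun bagcolors nb => (lookupbagFuel r f nb).foldl pvPush bagcolors) acc).Nodup := by
      intro l
      induction l with
      | nil => exact fun acc h => h
      | cons v l ihl =>
        intro acc h
        exact ihl _ (pushAll_nodup _ h)
    rw [show lookupbagFuel r (f+1) b = (match PySem.Dict.get? (PySem.Dict.mk r) b with
        | some bags => bags.foldl (fun bagcolors nb => (lookupbagFuel r f nb).foldl pvPush bagcolors) [b]
        | none => [b]) from rfl]
    cases PySem.Dict.get? (PySem.Dict.mk r) b with
    | none => simp
    | some bags => exact gen bags [b] (List.nodup_singleton b)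

theorem mem_lookupbagFuel {r : List (String × List String)} :
    ∀ f b y, y ∈ lookupbagFuel r f b → pvReach r b y := by
  intro f
  induction f with
  | zero => intro b y h; simp [lookupbagFuel] at h
  | succ f ih =>
    intro b y
    have gen : ∀ (l : List String) (acc : List String),
        y ∈ l.foldl (fun bagcolors nb => (lookupbagFuel r f nb).foldl pvPush bagcolors) acc →
        y ∈ acc ∨ ∃ v ∈ l, y ∈ lookupbagFuel r f v := by
      intro l
      induction l with
      | nil => exact fun acc h => Or.inl h
      | cons v l ihl =>
        intro acc h
        rcases ihl _ h with h' | ⟨w, hw, hyw⟩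
        · rcases mem_pushAll.mp h' with h'' | h''
          · exact Or.inl h''
          · exact Or.inr ⟨v, List.mem_cons_self .., h''⟩
        · exact Or.inr ⟨w, List.mem_cons_of_mem _ hw, hyw⟩
    rw [show lookupbagFuel r (f+1) b = (match PySem.Dict.get? (PySem.Dict.mk r) b with
        | some bags => bags.foldl (fun bagcolors nb => (lookupbagFuel r f nb).foldl pvPush bagcolors) [b]
        | none => [b]) from rfl]
    cases hg : PySem.Dict.get? (PySem.Dict.mk r) b with
    | none =>
      intro h
      have : y = b := by simpa using h
      subst this
      exact Relation.ReflTransGen.refl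
    | some bags =>
      intro h
      have hch : pvChildren r b = bags := by
        simp [pvChildren, PySem.Dict.getD_eq_get?_getD, hg]
      rcases gen bags [b] h with h' | ⟨v, hv, hyv⟩
      · have : y = b := by simpa using h'
        subst this
        exact Relation.ReflTransGen.refl
      · exact Relation.ReflTransGen.head (show pvEdge r b v by rw [pvEdge, hch]; exact hv) (ih v y hyv)

-- the order list computed by B's visit, started with seen = the set of the order list
def pvV (r : List (String × List String)) (f : Nat) (s : List String) (b : String) : List String :=
  (pvVisit r f (s, s) b).2

theorem pvVisit_diag (r : List (String × List String)) :
    ∀ f b s, pvVisit r f (s, s) b = (pvV r f s b, pvV r f s b) := by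
  intro f
  induction f with
  | zero => intro b s; rfl
  | succ f ih =>
    intro b s
    show (if PySem.Set.contains s b then ((s : PySem.Set String), s) else
        (PySem.Dict.getD (PySem.Dict.mk r) b []).foldl (fun so b => pvVisit r f so b)
          (PySem.Set.add s b, s ++ [b])) = _
    by_cases hb : b ∈ s
    · rw [if_pos (by simpa [PySem.Set.contains_eq_listContains, List.contains_iff_mem] using hb)]
      have : pvV r (f+1) s b = s := by
        unfold pvV
        show (if PySem.Set.contains s b then ((s : PySem.Set String), s) else _).2 = s
        rw [if_pos (by simpa [PySem.Set.contains_eq_listContains, List.contains_iff_mem] using hb)]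
      rw [this]
    · have hc : PySem.Set.contains s b = false := by
        simpa [PySem.Set.contains_eq_listContains, List.contains_iff_mem] using hb
      have hadd : PySem.Set.add s b = s ++ [b] := PySem.Set.add_of_not_mem hb
      have foldD : ∀ (l : List String) (t : List String),
          l.foldl (fun so b => pvVisit r f so b) ((t : PySem.Set String), t)
            = (l.foldl (pvV r f) t, l.foldl (pvV r f) t) := by
        intro l
        induction l with
        | nil => exact fun t => rfl
        | cons v l ihl =>
          intro t
          simp only [List.foldl_cons]
          rw [ih v t, ihl]
      have hres : pvVisit r (f+1) ((s : PySem.Set String), s) b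
          = ((pvChildren r b).foldl (pvV r f) (s ++ [b]),
             (pvChildren r b).foldl (pvV r f) (s ++ [b])) := by
        show (if PySem.Set.contains s b then ((s : PySem.Set String), s) else
            (PySem.Dict.getD (PySem.Dict.mk r) b []).foldl (fun so b => pvVisit r f so b)
              (PySem.Set.add s b, s ++ [b])) = _
        rw [if_neg (by rw [hc]; simp), hadd]
        exact foldD (pvChildren r b) (s ++ [b])
      have h2 : pvV r (f+1) s b = List.foldl (pvV r f) (s ++ [b]) (pvChildren r b) :=
        congrArg Prod.snd hres
      rw [h2]
      exact hres

theorem pvV_succ (r : List (String × List String)) (f : Nat) (s : List String) (b : String) :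
    pvV r (f+1) s b =
      if b ∈ s then s else (pvChildren r b).foldl (pvV r f) (s ++ [b]) := by
  unfold pvV
  show (if PySem.Set.contains s b then ((s : PySem.Set String), s) else
      (PySem.Dict.getD (PySem.Dict.mk r) b []).foldl (fun so b => pvVisit r f so b)
        (PySem.Set.add s b, s ++ [b])).2 = _
  by_cases hb : b ∈ s
  · rw [if_pos (by simpa [PySem.Set.contains_eq_listContains, List.contains_iff_mem] using hb),
      if_pos hb]
  · have hc : PySem.Set.contains s b = false := by
      simpa [PySem.Set.contains_eq_listContains, List.contains_iff_mem] using hb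
    rw [if_neg (by rw [hc]; simp), if_neg hb, PySem.Set.add_of_not_mem hb]
    have foldD : ∀ (l : List String) (t : List String),
        l.foldl (fun so b => pvVisit r f so b) ((t : PySem.Set String), t)
          = (l.foldl (pvV r f) t, l.foldl (pvV r f) t) := by
      intro l
      induction l with
      | nil => exact fun t => rfl
      | cons v l ihl =>
        intro t
        simp only [List.foldl_cons]
        rw [pvVisit_diag r f v t, ihl]
    rw [foldD (PySem.Dict.getD (PySem.Dict.mk r) b []) (s ++ [b])]
    rfl

theorem pvG {r : List (String × List String)} :
    ∀ f b acc, (b ∉ pvKeys r ∨ b ∈ pvOk r r.length) → pvFits r f b = true →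
      (∀ x ∈ acc, pvReach r b x → ∀ y, pvReach r x y → y ∈ acc) →
      List.foldl pvPush acc (lookupbagFuel r f b) = pvV r f acc b
        ∧ (∀ y, y ∈ pvV r f acc b ↔ y ∈ acc ∨ pvReach r b y) := by
  intro f
  induction f with
  | zero => intro b acc _ hfit; simp [pvFits] at hfit
  | succ f ih =>
    intro b acc hok hfit hgood
    by_cases hb : b ∈ acc
    · have hsub : ∀ y, pvReach r b y → y ∈ acc := fun y hy =>
        hgood b hb Relation.ReflTransGen.refl y hy
      have hA : List.foldl pvPush acc (lookupbagFuel r (f+1) b) = acc :=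
        pushAll_eq_of_subset (fun x hx => hsub x (mem_lookupbagFuel _ b x hx))
      have hB : pvV r (f+1) acc b = acc := by rw [pvV_succ, if_pos hb]
      refine ⟨by rw [hA, hB], ?_⟩
      rw [hB]
      intro y
      exact ⟨Or.inl, fun h => by rcases h with h | h; exact h; exact hsub y h⟩
    · have hfits : ∀ v ∈ pvChildren r b, pvFits r f v = true := by
        rw [show pvFits r (f+1) b = (pvChildren r b).all (pvFits r f) from rfl,
          List.all_eq_true] at hfit
        exact hfit
      have hAeq : lookupbagFuel r (f+1) b
          = (pvChildren r b).foldl (fun x nb => List.foldl pvPush x (lookupbagFuel r f nb)) [b] := by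
        rw [show lookupbagFuel r (f+1) b = (match PySem.Dict.get? (PySem.Dict.mk r) b with
            | some bags => bags.foldl (fun bagcolors nb => (lookupbagFuel r f nb).foldl pvPush bagcolors) [b]
            | none => [b]) from rfl]
        cases hg : PySem.Dict.get? (PySem.Dict.mk r) b with
        | none => simp [pvChildren, PySem.Dict.getD_eq_get?_getD, hg]
        | some bags => simp [pvChildren, PySem.Dict.getD_eq_get?_getD, hg]
      have hacc : List.foldl pvPush acc [b] = acc ++ [b] := by
        simp [pvPush, hb]
      have hok_child : ∀ v ∈ pvChildren r b, v ∉ pvKeys r ∨ v ∈ pvOk r r.length := by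
        intro v hv
        have hbkey : b ∈ pvKeys r := pvEdge_key (show pvEdge r b v from hv)
        have hbok : b ∈ pvOk r r.length := hok.resolve_left (fun h => h hbkey)
        obtain ⟨m, hm⟩ : ∃ m, r.length = m + 1 := by
          cases hL : r.length with
          | zero => rw [hL] at hbok; simp [pvOk] at hbok
          | succ m => exact ⟨m, rfl⟩
        rw [hm] at hbok
        rcases pvOk_step hbok v hv with hnk | hv'
        · exact Or.inl hnk
        · exact Or.inr (by rw [hm]; exact pvOk_mono1 m v hv')
      have hNCb : ∀ v ∈ pvChildren r b, ¬ pvReach r v b := by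
        intro v hv
        have hbkey : b ∈ pvKeys r := pvEdge_key (show pvEdge r b v from hv)
        have hbok : b ∈ pvOk r r.length := hok.resolve_left (fun h => h hbkey)
        exact pvNC r.length b hbok v hv
      -- the inner fold over the children, with its invariant
      have main : ∀ (l : List String), (∀ v ∈ l, v ∈ pvChildren r b) → ∀ a,
          ((∀ x ∈ acc, x ∈ a) ∧
            ∀ x ∈ a, x ∈ acc ∨ x = b ∨ (pvReach r b x ∧ ∀ y, pvReach r x y → y ∈ a)) →
          l.foldl (fun x nb => List.foldl pvPush x (lookupbagFuel r f nb)) a = l.foldl (pvV r f) a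
          ∧ (∀ y, y ∈ l.foldl (pvV r f) a ↔ y ∈ a ∨ ∃ v ∈ l, pvReach r v y)
          ∧ ((∀ x ∈ acc, x ∈ l.foldl (pvV r f) a) ∧
            ∀ x ∈ l.foldl (pvV r f) a, x ∈ acc ∨ x = b ∨
              (pvReach r b x ∧ ∀ y, pvReach r x y → y ∈ l.foldl (pvV r f) a)) := by
        intro l
        induction l with
        | nil => exact fun _ a ha => ⟨rfl, by simp, ha⟩
        | cons v l ihl =>
          intro hl a ha
          have hv : v ∈ pvChildren r b := hl v (List.mem_cons_self ..)
          have hedge : pvEdge r b v := hv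
          have hgood_v : ∀ x ∈ a, pvReach r v x → ∀ y, pvReach r x y → y ∈ a := by
            intro x hx hvx y hxy
            rcases ha.2 x hx with hxacc | rfl | ⟨_, hclose⟩
            · exact ha.1 _ (hgood x hxacc (Relation.ReflTransGen.head hedge hvx) y hxy)
            · exact absurd hvx (hNCb v hv)
            · exact hclose y hxy
          obtain ⟨hA1, hchar⟩ := ih v a (hok_child v hv) (hfits v hv) hgood_v
          have hsubaa' : ∀ y ∈ a, y ∈ pvV r f a v := fun y hy => (hchar y).mpr (Or.inl hy)
          have hINV' : (∀ x ∈ acc, x ∈ pvV r f a v) ∧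
              ∀ x ∈ pvV r f a v, x ∈ acc ∨ x = b ∨
                (pvReach r b x ∧ ∀ y, pvReach r x y → y ∈ pvV r f a v) := by
            refine ⟨fun x hx => hsubaa' x (ha.1 x hx), ?_⟩
            intro x hx
            rcases (hchar x).mp hx with hxa | hvx
            · rcases ha.2 x hxa with h1 | h2 | ⟨h3, h4⟩
              · exact Or.inl h1
              · exact Or.inr (Or.inl h2)
              · exact Or.inr (Or.inr ⟨h3, fun y hy => hsubaa' y (h4 y hy)⟩)
            · refine Or.inr (Or.inr ⟨Relation.ReflTransGen.head hedge hvx, fun y hy => ?_⟩)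
              exact (hchar y).mpr (Or.inr (hvx.trans hy))
          obtain ⟨e1, e2, e3⟩ := ihl (fun w hw => hl w (List.mem_cons_of_mem _ hw)) (pvV r f a v) hINV'
          refine ⟨?_, ?_, ?_⟩
          · simp only [List.foldl_cons]
            rw [hA1]
            exact e1
          · intro y
            simp only [List.foldl_cons]
            rw [e2 y, hchar y]
            have hec : (∃ w ∈ v :: l, pvReach r w y) ↔ pvReach r v y ∨ ∃ w ∈ l, pvReach r w y := by
              simp
            rw [hec]
            tauto
          · simpa only [List.foldl_cons] using e3
      obtain ⟨m1, m2, _⟩ := main (pvChildren r b) (fun v hv => hv) (acc ++ [b])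
        ⟨fun x hx => List.mem_append_left _ hx, by
          intro x hx
          rcases List.mem_append.mp hx with h | h
          · exact Or.inl h
          · exact Or.inr (Or.inl (by simpa using h))⟩
      constructor
      · rw [hAeq, pushAll_foldl, hacc, m1, pvV_succ, if_neg hb]
      · intro y
        have hhead : pvReach r b y ↔ b = y ∨ ∃ c, pvEdge r b c ∧ pvReach r c y :=
          Relation.ReflTransGen.cases_head_iff
        rw [pvV_succ, if_neg hb, m2 y, hhead]
        simp only [List.mem_append, List.mem_singleton]
        constructor
        · rintro (⟨h | rfl⟩ | ⟨v, hv, hvy⟩)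
          · exact Or.inl h
          · exact Or.inr (Or.inl rfl)
          · exact Or.inr (Or.inr ⟨v, hv, hvy⟩)
        · rintro (h | rfl | ⟨v, hv, hvy⟩)
          · exact Or.inl (Or.inl h)
          · exact Or.inl (Or.inr rfl)
          · exact Or.inr ⟨v, hv, hvy⟩

-- ===== VERDICT (by name: the statement is the Claim_ definition above) =====
theorem lookupbag_spec : Claim_equal_lookupbag := by
  intro r c _ hpre
  unfold Spec_lookupbag lookupbag lookupbag_alt
  have hfit : pvFits r (r.length + 1) c = true := pvFits_of_ok r.length c hpre
  obtain ⟨h1, _⟩ := pvG (r.length + 1) c [] hpre hfit (by intro x hx; simp at hx)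
  have h2 : List.foldl pvPush [] (lookupbagFuel r (r.length + 1) c)
      = lookupbagFuel r (r.length + 1) c := by
    have := pushAll_of_nodup (a := []) (l := lookupbagFuel r (r.length + 1) c)
      (by simpa using lookupbagFuel_nodup r (r.length + 1) c)
    simpa using this
  show lookupbagFuel r (r.length + 1) c = pvV r (r.length + 1) [] c
  rw [← h2]
  exact h1
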